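-- pv_equiv track=rewrite | github.com/bbureau12/echoBell | packages/perception/vision.py | _derive_flags
-- ===== SOURCE A (Python) =====
-- from typing import List
--
-- def _derive_flags(labels: List[str]) -> dict:
--     return {
--         "person_present": any(l == "person" for l in labels),
--         "package_box": any(l == "package" for l in labels),
--         "vehicle_present": any(l == "vehicle" for l in labels),
--         "dog_present": any(l == "dog" for l in labels),
--         "uniform": None,  # placeholder; see note below
--     }
-- ===== SOURCE B (Python) =====
-- from typing import List
--
-- def _derive_flags(labels: List[str]) -> dict:
--     flags = {
--         "person_present": False,
--         "package_box": False,
--         "vehicle_present": False,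
--         "dog_present": False,
--         "uniform": None,
--     }
--     for l in labels:
--         if l == "person":
--             flags["person_present"] = True
--         elif l == "package":
--             flags["package_box"] = True
--         elif l == "vehicle":
--             flags["vehicle_present"] = True
--         elif l == "dog":
--             flags["dog_present"] = True
--     return flags
-- ===== Notes on version B (the rewrite author's own statement) =====
-- stated objective: alternative
-- what changed: Replaces four independent any() scans over labels with a single pass that initializes all flags False and sets the matching flag on each label.
import Mathlib
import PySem

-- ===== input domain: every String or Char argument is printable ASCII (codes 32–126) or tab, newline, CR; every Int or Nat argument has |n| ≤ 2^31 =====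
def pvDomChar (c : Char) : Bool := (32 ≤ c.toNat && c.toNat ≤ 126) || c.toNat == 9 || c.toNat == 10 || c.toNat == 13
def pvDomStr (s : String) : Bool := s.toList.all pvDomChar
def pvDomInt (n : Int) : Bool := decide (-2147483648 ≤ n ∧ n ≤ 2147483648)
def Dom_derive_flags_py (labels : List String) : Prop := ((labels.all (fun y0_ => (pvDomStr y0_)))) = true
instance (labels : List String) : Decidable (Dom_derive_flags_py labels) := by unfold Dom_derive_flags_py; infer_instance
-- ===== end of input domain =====

-- B replaces the four independent any() scans of A with a single pass over labels that maintains the four flags as state (alternative decomposition, same cost).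
-- ===== PORT A =====
def derive_flags_py (labels : List String) : List (String × Option Bool) :=
  [("person_present", some (labels.any (fun l => l == "person"))),
   ("package_box", some (labels.any (fun l => l == "package"))),
   ("vehicle_present", some (labels.any (fun l => l == "vehicle"))),
   ("dog_present", some (labels.any (fun l => l == "dog"))),
   ("uniform", none)]

-- ===== PORT B =====
-- single pass maintaining the four flags as state
def derive_flags_py_alt_loop (labels : List String) (p pk v d : Bool) : Bool × Bool × Bool × Bool :=
  match labels with
  | [] => (p, pk, v, d)
  | l :: rest =>
    if l == "person" then derive_flags_py_alt_loop rest true pk v d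
    else if l == "package" then derive_flags_py_alt_loop rest p true v d
    else if l == "vehicle" then derive_flags_py_alt_loop rest p pk true d
    else if l == "dog" then derive_flags_py_alt_loop rest p pk v true
    else derive_flags_py_alt_loop rest p pk v d

def derive_flags_py_alt (labels : List String) : List (String × Option Bool) :=
  let s := derive_flags_py_alt_loop labels false false false false
  [("person_present", some s.1),
   ("package_box", some s.2.1),
   ("vehicle_present", some s.2.2.1),
   ("dog_present", some s.2.2.2),
   ("uniform", none)]

-- ===== PRECONDITION & SPEC =====
def Spec_derive_flags_py (labels : List String) (out : List (String × Option Bool)) : Prop := out = derive_flags_py_alt labels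
instance (labels : List String) (out : List (String × Option Bool)) : Decidable (Spec_derive_flags_py labels out) := by unfold Spec_derive_flags_py; infer_instance

-- ===== CLAIM (what is proved, stated in full; the proofs are below) =====
def Claim_equal_derive_flags_py : Prop := ∀ (labels : List String), Dom_derive_flags_py labels → Spec_derive_flags_py labels (derive_flags_py labels)

-- ===== LEMMAS AND PROOFS =====

theorem alt_loop_eq (labels : List String) (p pk v d : Bool) :
    derive_flags_py_alt_loop labels p pk v d =
      (p || labels.any (fun l => l == "person"),
       pk || labels.any (fun l => l == "package"),
       v || labels.any (fun l => l == "vehicle"),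
       d || labels.any (fun l => l == "dog")) := by
  induction labels generalizing p pk v d with
  | nil => simp [derive_flags_py_alt_loop]
  | cons l rest ih =>
    simp only [derive_flags_py_alt_loop, List.any_cons]
    split_ifs with h1 h2 h3 h4
    · obtain rfl : l = "person" := eq_of_beq h1; rw [ih]; simp
    · obtain rfl : l = "package" := eq_of_beq h2; rw [ih]; simp
    · obtain rfl : l = "vehicle" := eq_of_beq h3; rw [ih]; simp
    · obtain rfl : l = "dog" := eq_of_beq h4; rw [ih]; simp
    · rw [ih]; simp [h1, h2, h3, h4]

-- ===== VERDICT (by name: the statement is the Claim_ definition above) =====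
theorem derive_flags_py_spec : Claim_equal_derive_flags_py := by
  intro labels _
  unfold Spec_derive_flags_py derive_flags_py derive_flags_py_alt
  simp [alt_loop_eq]
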